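-- pv_equiv track=rewrite | github.com/agent-fox-dev/agent-fox-v3 | agent_fox/tools/outline.py | _collapse_import_lines
-- ===== SOURCE A (Python) =====
-- def _collapse_import_lines(indices: list[int]) -> list[tuple[int, int]]:
--     """Collapse contiguous 0-based line indices into (start, end) blocks."""
--     if not indices:
--         return []
--
--     blocks: list[tuple[int, int]] = []
--     block_start = indices[0]
--     prev = indices[0]
--
--     for idx in indices[1:]:
--         if idx == prev + 1:
--             prev = idx
--         else:
--             blocks.append((block_start, prev))
--             block_start = idx
--             prev = idx
--
--     blocks.append((block_start, prev))
--     return blocks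
-- ===== SOURCE B (Python) =====
-- from itertools import groupby
--
--
-- def _collapse_import_lines(indices: list[int]) -> list[tuple[int, int]]:
--     """Collapse contiguous 0-based line indices into (start, end) blocks."""
--     out: list[tuple[int, int]] = []
--     for _, grp in groupby(enumerate(indices), key=lambda p: p[1] - p[0]):
--         lst = list(grp)
--         out.append((lst[0][1], lst[-1][1]))
--     return out
-- ===== Notes on version B (the rewrite author's own statement) =====
-- stated objective: idiomatic
-- what changed: Replaced the explicit block_start/prev running-state loop with an itertools.groupby over enumerate(indices) keyed by value-minus-position, which is constant exactly on contiguous runs; each group is emitted as (first value, last value).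
import Mathlib
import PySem

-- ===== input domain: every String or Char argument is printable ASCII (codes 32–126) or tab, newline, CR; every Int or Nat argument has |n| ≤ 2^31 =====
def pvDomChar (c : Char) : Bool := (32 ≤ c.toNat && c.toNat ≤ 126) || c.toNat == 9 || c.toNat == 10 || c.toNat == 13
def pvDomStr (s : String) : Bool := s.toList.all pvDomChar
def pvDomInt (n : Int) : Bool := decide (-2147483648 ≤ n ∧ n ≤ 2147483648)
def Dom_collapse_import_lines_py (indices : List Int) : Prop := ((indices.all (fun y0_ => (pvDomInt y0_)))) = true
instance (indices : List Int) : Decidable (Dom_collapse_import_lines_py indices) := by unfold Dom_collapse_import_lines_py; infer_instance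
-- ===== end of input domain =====

-- B replaces A's explicit block_start/prev running-state loop with a groupby-over-enumerate
-- decomposition (key = value − position, constant on contiguous runs); same O(n) cost.


-- ===== PORT A =====
-- literal port of A: fold over indices[1:] with state (blocks, block_start, prev)
def collapse_import_lines_py (indices : List Int) : List (Int × Int) :=
  match indices with
  | [] => []
  | x :: rest =>
    let st := rest.foldl
      (fun (st : List (Int × Int) × Int × Int) idx =>
        let (blocks, block_start, prev) := st
        if idx = prev + 1 then (blocks, block_start, idx)
        else (blocks ++ [(block_start, prev)], idx, idx))
      ([], x, x)
    st.1 ++ [(st.2.1, st.2.2)]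

-- ===== PORT B =====
-- hand port of itertools.groupby with key p.2 - p.1 over enumerate(indices):
-- pvTakeRun splits off the longest prefix with the given key, pvGroups iterates that.
def pvKey (p : Int × Int) : Int := p.2 - p.1

def pvTakeRun (k : Int) : List (Int × Int) → List (Int × Int) × List (Int × Int)
  | [] => ([], [])
  | p :: rest =>
    if pvKey p = k then
      let r := pvTakeRun k rest
      (p :: r.1, r.2)
    else ([], p :: rest)

theorem pvTakeRun_snd_length (k : Int) (l : List (Int × Int)) :
    (pvTakeRun k l).2.length ≤ l.length := by
  induction l with
  | nil => simp [pvTakeRun]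
  | cons p rest ih =>
    simp only [pvTakeRun]
    split
    · simpa using Nat.le_succ_of_le ih
    · simp

def pvGroups : List (Int × Int) → List (List (Int × Int))
  | [] => []
  | p :: rest =>
    (p :: (pvTakeRun (pvKey p) rest).1) :: pvGroups (pvTakeRun (pvKey p) rest).2
termination_by l => l.length
decreasing_by
  exact Nat.lt_succ_of_le (pvTakeRun_snd_length _ _)

def collapse_import_lines_py_alt (indices : List Int) : List (Int × Int) :=
  (pvGroups (PySem.List.enumerate indices)).map
    (fun g => ((g.headD (0, 0)).2, (g.getLastD (0, 0)).2))

-- ===== PRECONDITION & SPEC =====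
def Spec_collapse_import_lines_py (indices : List Int) (out : List (Int × Int)) : Prop := out = collapse_import_lines_py_alt indices
instance (indices : List Int) (out : List (Int × Int)) : Decidable (Spec_collapse_import_lines_py indices out) := by unfold Spec_collapse_import_lines_py; infer_instance

-- ===== CLAIM (what is proved, stated in full; the proofs are below) =====
def Claim_equal_collapse_import_lines_py : Prop := ∀ (indices : List Int), Dom_collapse_import_lines_py indices → Spec_collapse_import_lines_py indices (collapse_import_lines_py indices)

-- ===== LEMMAS AND PROOFS =====

-- A's loop without the output accumulator: emit blocks from (block_start, prev) onward
def aRun (bs prev : Int) : List Int → List (Int × Int)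
  | [] => [(bs, prev)]
  | idx :: l => if idx = prev + 1 then aRun bs idx l else (bs, prev) :: aRun idx idx l

theorem aRun_foldl (l : List Int) :
    ∀ (blocks : List (Int × Int)) (bs prev : Int),
      (let st := l.foldl
        (fun (st : List (Int × Int) × Int × Int) idx =>
          let (blocks, block_start, prev) := st
          if idx = prev + 1 then (blocks, block_start, idx)
          else (blocks ++ [(block_start, prev)], idx, idx))
        (blocks, bs, prev)
       st.1 ++ [(st.2.1, st.2.2)]) = blocks ++ aRun bs prev l := by
  induction l with
  | nil => intro blocks bs prev; simp [aRun]
  | cons idx l ih =>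
    intro blocks bs prev
    simp only [List.foldl_cons, aRun]
    split
    · exact ih blocks bs idx
    · rw [ih (blocks ++ [(bs, prev)]) idx idx]; simp

theorem A_eq_aRun (x : Int) (rest : List Int) :
    collapse_import_lines_py (x :: rest) = aRun x x rest := by
  simpa [collapse_import_lines_py] using aRun_foldl rest [] x x

theorem B_main (l : List Int) :
    ∀ (f x i : Int),
      (f, (((pvTakeRun (x - i) (PySem.List.enumerate l (i + 1))).1).getLastD (i, x)).2)
        :: (pvGroups (pvTakeRun (x - i) (PySem.List.enumerate l (i + 1))).2).map
             (fun g => ((g.headD (0, 0)).2, (g.getLastD (0, 0)).2))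
      = aRun f x l := by
  induction l with
  | nil => intro f x i; simp [PySem.List.enumerate, pvTakeRun, pvGroups, aRun]
  | cons y l ih =>
    intro f x i
    rw [PySem.List.enumerate_cons]
    by_cases h : y = x + 1
    · have hk : pvKey (i + 1, y) = x - i := by simp only [pvKey]; omega
      simp only [pvTakeRun, hk, aRun, if_pos h, if_true]
      rw [List.getLastD_cons]
      have : x - i = y - (i + 1) := by omega
      rw [this]
      have := ih f y (i + 1)
      rw [show i + 1 + 1 = (i + 1) + 1 from rfl] at this ⊢
      exact this
    · have hk : pvKey (i + 1, y) ≠ x - i := by simp only [pvKey]; omega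
      simp only [pvTakeRun, if_neg hk, aRun, if_neg h]
      simp only [List.getLastD_nil, pvGroups, List.map_cons, List.headD_cons]
      rw [List.getLastD_cons]
      congr 1
      have hky : pvKey (i + 1, y) = y - (i + 1) := by simp [pvKey]
      rw [hky]
      exact ih y y (i + 1)

theorem B_eq_aRun (x : Int) (rest : List Int) :
    collapse_import_lines_py_alt (x :: rest) = aRun x x rest := by
  unfold collapse_import_lines_py_alt
  rw [PySem.List.enumerate_cons, pvGroups, List.map_cons, List.headD_cons,
    List.getLastD_cons]
  have hk : pvKey (0, x) = x - 0 := by simp [pvKey]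
  rw [hk]
  simpa using B_main rest x x 0

-- ===== VERDICT (by name: the statement is the Claim_ definition above) =====
theorem collapse_import_lines_py_spec : Claim_equal_collapse_import_lines_py := by
  intro indices _
  unfold Spec_collapse_import_lines_py
  cases indices with
  | nil => simp [collapse_import_lines_py, collapse_import_lines_py_alt,
      PySem.List.enumerate, pvGroups]
  | cons x rest => rw [A_eq_aRun, B_eq_aRun]
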